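-- pv_equiv track=rewrite | github.com/OpenBrowserAI/openbrowser | bridge/app.py | _host_is_allowlisted
-- ===== SOURCE A (Python) =====
-- from typing import Any, AsyncIterator, Dict, List, Optional, Sequence, Set, Tuple
--
-- def _host_is_allowlisted(host: str, allowlist: Set[str]) -> bool:
--     host = (host or "").strip().lower().rstrip(".")
--     if not host:
--         return False
--     if host in allowlist:
--         return True
--     for domain in allowlist:
--         if domain and host.endswith("." + domain):
--             return True
--     return False
-- ===== SOURCE B (Python) =====
-- def _host_is_allowlisted(host, allowlist):
--     host = (host or "").strip().lower().rstrip(".")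
--     if not host:
--         return False
--     s = set(allowlist)
--     suffix = host
--     while True:
--         if suffix in s:
--             return True
--         i = suffix.find(".")
--         if i == -1:
--             return False
--         suffix = suffix[i + 1:]
-- ===== Notes on version B (the rewrite author's own statement) =====
-- stated objective: faster
-- what changed: Instead of scanning the whole allowlist and testing endswith for each domain, B walks the host's dotted suffixes (cutting at each first dot) and does one set-membership lookup per suffix, so the cost no longer grows with the allowlist size.
import Mathlib
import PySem

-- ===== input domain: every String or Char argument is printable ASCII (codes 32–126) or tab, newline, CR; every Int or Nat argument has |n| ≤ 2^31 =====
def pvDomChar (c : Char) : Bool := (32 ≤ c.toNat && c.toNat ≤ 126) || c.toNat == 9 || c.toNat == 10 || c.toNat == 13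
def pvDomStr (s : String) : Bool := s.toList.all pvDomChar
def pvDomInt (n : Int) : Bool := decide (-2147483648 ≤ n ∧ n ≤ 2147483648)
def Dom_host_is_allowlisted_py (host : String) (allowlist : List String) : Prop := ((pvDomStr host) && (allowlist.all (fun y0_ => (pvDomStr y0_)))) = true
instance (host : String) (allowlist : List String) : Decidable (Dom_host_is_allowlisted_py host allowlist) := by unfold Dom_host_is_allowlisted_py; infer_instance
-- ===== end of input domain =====

-- B replaces A's scan over the whole allowlist (endswith per domain) by a walk over the
-- host's dotted suffixes with one set lookup each, so cost no longer grows with the allowlist.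


-- shared first line of both Pythons: host = (host or "").strip().lower().rstrip(".")
-- rstrip(".") has no PySem primitive; ported exactly as: drop the trailing '.' characters.
def pvNormHost (host : String) : List Char :=
  let base := if host = "" then "" else host   -- (host or "")
  ((PySem.Chars.lower (PySem.Chars.strip base.toList)).reverse.dropWhile (fun c => c == '.')).reverse

-- ===== PORT A =====
def host_is_allowlisted_py (host : String) (allowlist : List String) : Bool :=
  let h := pvNormHost host
  if h = [] then false                                   -- if not host: return False
  else if (allowlist.map String.toList).contains h then true   -- if host in allowlist (set membership)
  else allowlist.any (fun domain =>                      -- for domain in allowlist: if domain and host.endswith("." + domain)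
    !(domain.toList == []) && PySem.Chars.endswith h ('.' :: domain.toList))

-- ===== PORT B =====
-- the while-loop of Source B: check the current suffix, then cut at its first dot
-- (i = suffix.find(".") written inline; same value in both uses)
def pvSuffixLoop (s : PySem.Set (List Char)) (suffix : List Char) : Bool :=
  if PySem.Set.contains s suffix then true
  else if hfind : PySem.Chars.find suffix ['.'] = -1 then false
  else pvSuffixLoop s (suffix.drop ((PySem.Chars.find suffix ['.']).toNat + 1))
termination_by suffix.length
decreasing_by
  have hin : ['.'] <:+: suffix := (PySem.Chars.find_ne_neg_one_iff _ _).mp hfind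
  have hne : suffix ≠ [] := by
    intro hnil; rw [hnil] at hin; exact absurd (List.eq_nil_of_infix_nil hin) (by simp)
  have := List.length_pos_of_ne_nil hne
  simp only [List.length_drop]; omega

def host_is_allowlisted_py_alt (host : String) (allowlist : List String) : Bool :=
  let h := pvNormHost host
  if h = [] then false
  else
    let s : PySem.Set (List Char) := PySem.Set.ofList (allowlist.map String.toList)
    pvSuffixLoop s h

-- ===== PRECONDITION & SPEC =====
def Spec_host_is_allowlisted_py (host : String) (allowlist : List String) (out : Bool) : Prop := out = host_is_allowlisted_py_alt host allowlist
instance (host : String) (allowlist : List String) (out : Bool) : Decidable (Spec_host_is_allowlisted_py host allowlist out) := by unfold Spec_host_is_allowlisted_py; infer_instance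

-- ===== CLAIM (what is proved, stated in full; the proofs are below) =====
def Claim_equal_host_is_allowlisted_py : Prop := ∀ (host : String) (allowlist : List String), Dom_host_is_allowlisted_py host allowlist → Spec_host_is_allowlisted_py host allowlist (host_is_allowlisted_py host allowlist)

-- ===== LEMMAS AND PROOFS =====

-- head of a dropWhile never satisfies the predicate
lemma head?_dropWhile {p : Char → Bool} {a : Char} :
    ∀ (l : List Char), (l.dropWhile p).head? = some a → p a = false := by
  intro l h
  induction l with
  | nil => simp [List.dropWhile] at h
  | cons x xs ih =>
    by_cases hx : p x
    · rw [List.dropWhile_cons_of_pos hx] at h; exact ih h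
    · rw [List.dropWhile_cons_of_neg hx] at h
      simp at h; subst h; simpa using hx

-- a normalized host never ends with '.'
lemma norm_no_trailing_dot (host : String) : ¬ (['.'] <:+ pvNormHost host) := by
  rintro ⟨u, hu⟩
  have hrev : (pvNormHost host).reverse.head? = some '.' := by
    rw [← hu]; simp
  unfold pvNormHost at hrev
  rw [List.reverse_reverse] at hrev
  have := head?_dropWhile _ hrev
  simp at this

-- Set.contains is list membership
lemma set_contains_iff (s : PySem.Set (List Char)) (x : List Char) :
    PySem.Set.contains s x = true ↔ x ∈ (s : List (List Char)) := by
  simp [PySem.Set.contains]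

-- what B's loop computes: some dotted suffix (or the string itself) is in the set
lemma pvSuffixLoop_spec (s : PySem.Set (List Char)) :
    ∀ (n : Nat) (h : List Char), h.length ≤ n →
      (pvSuffixLoop s h = true ↔ h ∈ (s : List (List Char)) ∨ ∃ t, ('.' :: t) <:+ h ∧ t ∈ (s : List (List Char))) := by
  intro n
  induction n with
  | zero =>
    intro h hlen
    have hnil : h = [] := List.eq_nil_of_length_eq_zero (Nat.le_zero.mp hlen)
    subst hnil
    rw [pvSuffixLoop]
    by_cases hc : PySem.Set.contains s [] = true
    · rw [if_pos hc]
      simp only [true_iff]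
      left; exact (set_contains_iff s []).mp hc
    · rw [if_neg hc, dif_pos (by decide : PySem.Chars.find ([] : List Char) ['.'] = -1)]
      constructor
      · intro hfalse; exact absurd hfalse (by simp)
      · rintro (hm | ⟨t, hsuf, _⟩)
        · exact absurd ((set_contains_iff s []).mpr hm) hc
        · exact absurd (List.eq_nil_of_suffix_nil hsuf) (by simp)
  | succ n ih =>
    intro h hlen
    rw [pvSuffixLoop]
    by_cases hc : PySem.Set.contains s h = true
    · rw [if_pos hc]
      simp only [true_iff]
      left; exact (set_contains_iff s h).mp hc
    · have hcm : h ∉ (s : List (List Char)) := fun hm => hc ((set_contains_iff s h).mpr hm)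
      rw [if_neg hc]
      by_cases hfind : PySem.Chars.find h ['.'] = -1
      · rw [dif_pos hfind]
        constructor
        · intro hfalse; exact absurd hfalse (by simp)
        · rintro (hm | ⟨t, hsuf, _⟩)
          · exact absurd hm hcm
          · have h1 : ['.'] <+: ('.' :: t) := ⟨t, rfl⟩
            have : ['.'] <:+: h := List.IsInfix.trans (List.IsPrefix.isInfix h1) (List.IsSuffix.isInfix hsuf)
            exact absurd this ((PySem.Chars.find_eq_neg_one_iff _ _).mp hfind)
      · rw [dif_neg hfind]
        have hnn : 0 ≤ PySem.Chars.find h ['.'] := by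
          have := PySem.Chars.neg_one_le_find h ['.']; omega
        obtain ⟨hpref, hmin⟩ := PySem.Chars.find_spec (s := h) (sub := ['.']) hnn
        set i : Nat := (PySem.Chars.find h ['.']).toNat with hi
        have hdropne : h.drop i ≠ [] := by
          intro hnil; rw [hnil] at hpref
          exact absurd (List.eq_nil_of_prefix_nil hpref) (by simp)
        have hlt : i < h.length := by
          by_contra hge
          exact hdropne (List.drop_eq_nil_of_le (by omega))
        have hdec : h.drop i = '.' :: h.drop (i + 1) := by
          obtain ⟨w, hw⟩ := hpref
          rw [← List.tail_drop, ← hw]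
          simp
        have ihdrop := ih (h.drop (i + 1)) (by simp only [List.length_drop]; omega)
        rw [ihdrop]
        constructor
        · rintro (hm | ⟨t, hsuf, hts⟩)
          · right; refine ⟨h.drop (i + 1), ?_, hm⟩
            rw [← hdec]; exact List.drop_suffix i h
          · right; exact ⟨t, hsuf.trans (List.drop_suffix (i + 1) h), hts⟩
        · rintro (hm | ⟨t, hsuf, hts⟩)
          · exact absurd hm hcm
          · obtain ⟨u, hu⟩ := hsuf
            have hdropu : h.drop u.length = '.' :: t := by rw [← hu]; simp
            have hprefu : ['.'] <+: h.drop u.length := by rw [hdropu]; exact ⟨t, rfl⟩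
            have hile : i ≤ u.length := by
              by_contra hlt'
              exact hmin u.length (by omega) hprefu
            rcases Nat.eq_or_lt_of_le hile with heq | hlt'
            · left
              have ht : h.drop (i + 1) = t := by
                have htl := congrArg List.tail hdropu
                rw [List.tail_drop] at htl
                rw [← heq] at htl; simpa using htl
              rw [ht]; exact hts
            · right
              refine ⟨t, ?_, hts⟩
              have hteq : '.' :: t = (h.drop (i + 1)).drop (u.length - (i + 1)) := by
                rw [List.drop_drop, Nat.add_sub_cancel' (by omega), hdropu]
              rw [show ('.' :: t <:+ h.drop (i + 1)) = ((h.drop (i + 1)).drop (u.length - (i + 1)) <:+ h.drop (i + 1)) from by rw [← hteq]]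
              exact List.drop_suffix _ _

-- what A's allowlist scan computes
lemma portA_spec (host : String) (allowlist : List String) (hne : pvNormHost host ≠ []) :
    (host_is_allowlisted_py host allowlist = true ↔
      pvNormHost host ∈ allowlist.map String.toList ∨
        ∃ t, ('.' :: t) <:+ pvNormHost host ∧ t ∈ allowlist.map String.toList) := by
  unfold host_is_allowlisted_py
  rw [if_neg hne]
  by_cases hc : (allowlist.map String.toList).contains (pvNormHost host) = true
  · rw [if_pos hc]
    simp only [true_iff]
    left; exact List.contains_iff_mem.mp hc
  · rw [if_neg hc]
    rw [List.any_eq_true]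
    constructor
    · rintro ⟨d, hd, hdp⟩
      simp only [Bool.and_eq_true, Bool.not_eq_true', beq_eq_false_iff_ne, ne_eq] at hdp
      right
      refine ⟨d.toList, (PySem.Chars.endswith_iff _ _).mp hdp.2, List.mem_map_of_mem hd⟩
    · rintro (hm | ⟨t, hsuf, hts⟩)
      · exact absurd (List.contains_iff_mem.mpr hm) hc
      · obtain ⟨d, hd, rfl⟩ := List.mem_map.mp hts
        refine ⟨d, hd, ?_⟩
        simp only [Bool.and_eq_true, Bool.not_eq_true', beq_eq_false_iff_ne, ne_eq]
        refine ⟨?_, (PySem.Chars.endswith_iff _ _).mpr hsuf⟩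
        intro hdnil
        rw [hdnil] at hsuf
        exact norm_no_trailing_dot host hsuf

-- ===== VERDICT (by name: the statement is the Claim_ definition above) =====
theorem host_is_allowlisted_py_spec : Claim_equal_host_is_allowlisted_py := by
  intro host allowlist _
  unfold Spec_host_is_allowlisted_py
  by_cases hne : pvNormHost host = []
  · unfold host_is_allowlisted_py host_is_allowlisted_py_alt
    simp [hne]
  · apply Bool.coe_iff_coe.mp
    rw [portA_spec host allowlist hne]
    unfold host_is_allowlisted_py_alt
    rw [if_neg hne]
    rw [pvSuffixLoop_spec _ (pvNormHost host).length _ le_rfl]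
    constructor
    · rintro (hm | ⟨t, hsuf, hts⟩)
      · left; exact (PySem.Set.mem_ofList _ _).mpr hm
      · right; exact ⟨t, hsuf, (PySem.Set.mem_ofList _ _).mpr hts⟩
    · rintro (hm | ⟨t, hsuf, hts⟩)
      · left; exact (PySem.Set.mem_ofList _ _).mp hm
      · right; exact ⟨t, hsuf, (PySem.Set.mem_ofList _ _).mp hts⟩
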